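-- pv_equiv track=rewrite | github.com/jinsong8/FinRpt | dataset/statistics.py | month_count
-- ===== SOURCE A (Python) =====
-- def month_count(gen_reports):
--     _9 = 0
--     _10 = 0
--     _11 = 0
--     for report in gen_reports:
--         if report['date'].startswith('2024-09'):
--             _9 += 1
--         elif report['date'].startswith('2024-10'):
--             _10 += 1
--         elif report['date'].startswith('2024-11'):
--             _11 += 1
--     return [_9, _10, _11]
-- ===== SOURCE B (Python) =====
-- def month_count(gen_reports):
--     def tally(prefix):
--         return sum(1 for report in gen_reports if report['date'].startswith(prefix))
--     return [tally(p) for p in ('2024-09', '2024-10', '2024-11')]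
-- ===== Notes on version B (the rewrite author's own statement) =====
-- stated objective: simpler
-- what changed: Replaces the single loop with three explicit counters and an elif cascade by three independent staged passes, one generic tally(prefix) sum per month, assembled by a comprehension over the prefixes.
import Mathlib
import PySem

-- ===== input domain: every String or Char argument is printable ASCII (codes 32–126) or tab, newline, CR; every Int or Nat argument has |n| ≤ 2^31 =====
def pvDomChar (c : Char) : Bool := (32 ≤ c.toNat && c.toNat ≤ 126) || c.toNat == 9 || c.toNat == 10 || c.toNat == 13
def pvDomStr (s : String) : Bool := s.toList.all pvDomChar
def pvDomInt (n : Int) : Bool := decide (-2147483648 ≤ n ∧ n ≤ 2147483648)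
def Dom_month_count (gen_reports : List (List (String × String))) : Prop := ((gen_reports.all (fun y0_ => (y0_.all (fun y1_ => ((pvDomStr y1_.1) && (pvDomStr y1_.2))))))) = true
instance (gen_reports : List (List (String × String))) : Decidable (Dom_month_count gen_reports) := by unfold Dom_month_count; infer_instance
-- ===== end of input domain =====

-- B replaces A's single three-counter elif loop by three independent staged tally passes, one per month prefix; same cost, simpler shape.


-- report['date'] (both Pythons do this lookup; none = KeyError, excluded by Pre_)
def pyGetDate (report : List (String × String)) : String :=
  ((PySem.Dict.ofList report).get? "date").getD ""

-- ===== PORT A =====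
def month_count (gen_reports : List (List (String × String))) : List Int :=
  let st := gen_reports.foldl (fun (s : Int × Int × Int) report =>
    let d := pyGetDate report
    if PySem.Str.startswith d "2024-09" then (s.1 + 1, s.2.1, s.2.2)
    else if PySem.Str.startswith d "2024-10" then (s.1, s.2.1 + 1, s.2.2)
    else if PySem.Str.startswith d "2024-11" then (s.1, s.2.1, s.2.2 + 1)
    else s) (0, 0, 0)
  [st.1, st.2.1, st.2.2]

-- ===== PORT B =====
-- tally(prefix): sum of 1 over the reports whose date starts with the prefix
def pyTally (gen_reports : List (List (String × String))) (pfx : String) : Int :=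
  gen_reports.foldl (fun acc report =>
    if PySem.Str.startswith (pyGetDate report) pfx then acc + 1 else acc) 0

def month_count_alt (gen_reports : List (List (String × String))) : List Int :=
  ["2024-09", "2024-10", "2024-11"].map (pyTally gen_reports)

-- ===== PRECONDITION & SPEC =====
-- Pre_ excludes reports without a 'date' key, on which both Pythons raise KeyError.
def Pre_month_count (gen_reports : List (List (String × String))) : Prop :=
  (gen_reports.all (fun r => (PySem.Dict.ofList r).contains "date")) = true
instance (gen_reports : List (List (String × String))) : Decidable (Pre_month_count gen_reports) := by unfold Pre_month_count; infer_instance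

def pvWitness_month_count : (List (List (String × String))) :=
  [[("date", "2024-09-15"), ("title", "q3")], [("date", "2024-11-01")], [("date", "2023-12-31")]]

def Spec_month_count (gen_reports : List (List (String × String))) (out : List Int) : Prop := out = month_count_alt gen_reports
instance (gen_reports : List (List (String × String))) (out : List Int) : Decidable (Spec_month_count gen_reports out) := by unfold Spec_month_count; infer_instance

-- ===== CLAIM (what is proved, stated in full; the proofs are below) =====
def Claim_equal_month_count : Prop := ∀ (gen_reports : List (List (String × String))), Dom_month_count gen_reports → Pre_month_count gen_reports → Spec_month_count gen_reports (month_count gen_reports)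

-- ===== LEMMAS AND PROOFS =====

-- the year-month prefix of a report's date
def keyOf (report : List (String × String)) : String :=
  PySem.Str.slice (pyGetDate report) none (some 7)

-- startswith with a 7-char pattern is equality of the 7-char slice
theorem startswith_eq_key (d m : String) (h : m.toList.length = 7) :
    PySem.Str.startswith d m = (PySem.Str.slice d none (some 7) == m) := by
  have h7 : PySem.List.slice d.toList none (some (7:Int)) = d.toList.take 7 := by
    simpa using PySem.List.slice_to_natCast d.toList 7
  rw [Bool.eq_iff_iff]
  rw [PySem.Str.startswith_eq, PySem.Chars.startswith_iff, beq_iff_eq]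
  constructor
  · intro hp
    rw [List.prefix_iff_eq_take, h] at hp
    apply String.toList_injective
    rw [PySem.Str.toList_slice, PySem.Chars.slice_eq_listSlice, h7]
    exact hp.symm
  · intro hs
    have := congrArg String.toList hs
    rw [PySem.Str.toList_slice, PySem.Chars.slice_eq_listSlice, h7] at this
    rw [List.prefix_iff_eq_take, h]
    exact this.symm

-- A's fold adds per-month key counts to any starting triple
theorem afold_eq_counts (l : List (List (String × String))) (a b c : Int) :
    l.foldl (fun (s : Int × Int × Int) report =>
      let d := pyGetDate report
      if PySem.Str.startswith d "2024-09" then (s.1 + 1, s.2.1, s.2.2)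
      else if PySem.Str.startswith d "2024-10" then (s.1, s.2.1 + 1, s.2.2)
      else if PySem.Str.startswith d "2024-11" then (s.1, s.2.1, s.2.2 + 1)
      else s) (a, b, c)
    = (a + ((l.map keyOf).count "2024-09" : Int),
       b + ((l.map keyOf).count "2024-10" : Int),
       c + ((l.map keyOf).count "2024-11" : Int)) := by
  induction l generalizing a b c with
  | nil => simp
  | cons r t ih =>
    simp only [List.foldl_cons, List.map_cons, List.count_cons]
    rw [startswith_eq_key _ _ (by decide), startswith_eq_key _ _ (by decide),
        startswith_eq_key _ _ (by decide),
        show PySem.Str.slice (pyGetDate r) none (some 7) = keyOf r from rfl]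
    by_cases h9 : keyOf r = "2024-09"
    · rw [if_pos (by simp [h9]), ih]
      simp [h9, Prod.ext_iff]
      omega
    · by_cases h10 : keyOf r = "2024-10"
      · rw [if_neg (by simp [h9]), if_pos (by simp [h10]), ih]
        simp [h10, Prod.ext_iff]
        omega
      · by_cases h11 : keyOf r = "2024-11"
        · rw [if_neg (by simp [h9]), if_neg (by simp [h10]), if_pos (by simp [h11]), ih]
          simp [h11, Prod.ext_iff]
          omega
        · rw [if_neg (by simp [h9]), if_neg (by simp [h10]), if_neg (by simp [h11]), ih]
          simp [h9, h10, h11]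

-- B's staged tally for a 7-char prefix counts that key
theorem tally_eq_count (l : List (List (String × String))) (m : String)
    (h : m.toList.length = 7) :
    pyTally l m = ((l.map keyOf).count m : Int) := by
  suffices haux : ∀ (a : Int), l.foldl (fun acc report =>
      if PySem.Str.startswith (pyGetDate report) m then acc + 1 else acc) a
      = a + ((l.map keyOf).count m : Int) by
    unfold pyTally; simpa using haux 0
  induction l with
  | nil => simp
  | cons r t ih =>
    intro a
    simp only [List.foldl_cons, List.map_cons, List.count_cons]
    rw [startswith_eq_key _ _ h,
        show PySem.Str.slice (pyGetDate r) none (some 7) = keyOf r from rfl]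
    by_cases hm : keyOf r = m
    · rw [if_pos (by simp [hm]), ih]
      simp [hm]; omega
    · rw [if_neg (by simp [hm]), ih]
      simp [hm]

-- ===== VERDICT (by name: the statement is the Claim_ definition above) =====
theorem month_count_spec : Claim_equal_month_count := by
  intro gen_reports _ _
  show month_count gen_reports = month_count_alt gen_reports
  unfold month_count month_count_alt
  simp only [List.map_cons, List.map_nil]
  rw [afold_eq_counts,
      tally_eq_count _ _ (by decide), tally_eq_count _ _ (by decide),
      tally_eq_count _ _ (by decide)]
  simp
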